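-- pv_equiv track=rewrite | github.com/CyberVines/Universal-Quantum-Cymatics | UQC/transmit_modes.py | _num_to_abjad
-- ===== SOURCE A (Python) =====
-- ABJAD_LETTERS = {
--     1: '\u0627', 2: '\u0628', 3: '\u062C', 4: '\u062F', 5: '\u0647',
--     6: '\u0648', 7: '\u0632', 8: '\u062D', 9: '\u0637', 10: '\u064A',
--     20: '\u0643', 30: '\u0644', 40: '\u0645', 50: '\u0646', 60: '\u0633',
--     70: '\u0639', 80: '\u0641', 90: '\u0635', 100: '\u0642', 200: '\u0631',
--     300: '\u0634', 400: '\u062A', 500: '\u062B', 600: '\u062E', 700: '\u0630',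
--     800: '\u0636', 900: '\u0638', 1000: '\u063A',
-- }
--
-- ABJAD_TRANSLIT = {
--     1: 'A', 2: 'B', 3: 'J', 4: 'D', 5: 'H', 6: 'W', 7: 'Z',
--     8: 'Hh', 9: 'T', 10: 'Y', 20: 'K', 30: 'L', 40: 'M', 50: 'N',
--     60: 'S', 70: 'Ay', 80: 'F', 90: 'Sd', 100: 'Q', 200: 'R',
--     300: 'Sh', 400: 'T2', 500: 'Th', 600: 'Kh', 700: 'Dh', 800: 'Dd',
--     900: 'Zh', 1000: 'Gh',
-- }
--
-- ABJAD_VALUES = sorted(ABJAD_LETTERS.keys(), reverse=True)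
--
-- def _num_to_abjad(n):
--     """Convert number to Arabic/Abjad letter(s) using additive decomposition."""
--     if n <= 0 or n > 1999:
--         return str(n)
--     letters = []
--     translit = []
--     remaining = n
--     for v in ABJAD_VALUES:
--         while remaining >= v:
--             letters.append(ABJAD_LETTERS[v])
--             translit.append(ABJAD_TRANSLIT[v])
--             remaining -= v
--     return ''.join(letters) + '(' + ''.join(translit) + ')' if letters else str(n)
-- ===== SOURCE B (Python) =====
-- # Table-per-decimal-place lookup: no loop over abjad values at all.
-- UNITS_L     = ['', '\u0627', '\u0628', '\u062C', '\u062F', '\u0647', '\u0648', '\u0632', '\u062D', '\u0637']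
-- TENS_L      = ['', '\u064A', '\u0643', '\u0644', '\u0645', '\u0646', '\u0633', '\u0639', '\u0641', '\u0635']
-- HUNDREDS_L  = ['', '\u0642', '\u0631', '\u0634', '\u062A', '\u062B', '\u062E', '\u0630', '\u0636', '\u0638']
-- THOUSANDS_L = ['', '\u063A']
-- UNITS_T     = ['', 'A', 'B', 'J', 'D', 'H', 'W', 'Z', 'Hh', 'T']
-- TENS_T      = ['', 'Y', 'K', 'L', 'M', 'N', 'S', 'Ay', 'F', 'Sd']
-- HUNDREDS_T  = ['', 'Q', 'R', 'Sh', 'T2', 'Th', 'Kh', 'Dh', 'Dd', 'Zh']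
-- THOUSANDS_T = ['', 'Gh']
--
-- def _num_to_abjad(n):
--     """Index four per-place tables by the decimal digits of n; zero digits map to ''."""
--     if n <= 0 or n > 1999:
--         return str(n)
--     th = n // 1000
--     h = n // 100 % 10
--     t = n // 10 % 10
--     u = n % 10
--     letters = THOUSANDS_L[th] + HUNDREDS_L[h] + TENS_L[t] + UNITS_L[u]
--     translit = THOUSANDS_T[th] + HUNDREDS_T[h] + TENS_T[t] + UNITS_T[u]
--     return letters + '(' + translit + ')'
-- ===== Notes on version B (the rewrite author's own statement) =====
-- stated objective: simpler
-- what changed: Replaces the greedy scan over ABJAD_VALUES with nested while loops by four per-decimal-place lookup tables indexed directly by the digits of n (zero digit maps to the empty string), so B has no loop at all.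
import Mathlib
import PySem

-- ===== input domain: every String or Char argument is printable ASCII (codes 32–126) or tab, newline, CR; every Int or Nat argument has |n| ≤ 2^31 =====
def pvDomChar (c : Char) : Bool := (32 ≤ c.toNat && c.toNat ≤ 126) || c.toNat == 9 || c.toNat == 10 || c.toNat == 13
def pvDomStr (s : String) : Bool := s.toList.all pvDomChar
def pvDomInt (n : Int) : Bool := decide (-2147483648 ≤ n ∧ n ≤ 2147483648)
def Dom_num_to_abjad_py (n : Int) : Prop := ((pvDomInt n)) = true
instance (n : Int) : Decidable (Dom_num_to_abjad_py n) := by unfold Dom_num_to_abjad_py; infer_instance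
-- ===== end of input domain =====

-- B replaces A's greedy scan of ABJAD_VALUES (nested while loops) by four per-decimal-place
-- lookup tables indexed by the digits of n (no loop at all); objective: simpler.

-- ===== PORT A =====
-- ABJAD_LETTERS[v] as a total lookup function (A only ever looks up keys present in the dict)
def abjadLetter (v : Int) : String :=
  if v = 1 then "\u0627" else if v = 2 then "\u0628" else if v = 3 then "\u062C" else if v = 4 then "\u062F"
  else if v = 5 then "\u0647" else if v = 6 then "\u0648" else if v = 7 then "\u0632" else if v = 8 then "\u062D"
  else if v = 9 then "\u0637" else if v = 10 then "\u064A" else if v = 20 then "\u0643" else if v = 30 then "\u0644"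
  else if v = 40 then "\u0645" else if v = 50 then "\u0646" else if v = 60 then "\u0633" else if v = 70 then "\u0639"
  else if v = 80 then "\u0641" else if v = 90 then "\u0635" else if v = 100 then "\u0642" else if v = 200 then "\u0631"
  else if v = 300 then "\u0634" else if v = 400 then "\u062A" else if v = 500 then "\u062B" else if v = 600 then "\u062E"
  else if v = 700 then "\u0630" else if v = 800 then "\u0636" else if v = 900 then "\u0638" else "\u063A"

def abjadTranslit (v : Int) : String :=
  if v = 1 then "A" else if v = 2 then "B" else if v = 3 then "J" else if v = 4 then "D"
  else if v = 5 then "H" else if v = 6 then "W" else if v = 7 then "Z" else if v = 8 then "Hh"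
  else if v = 9 then "T" else if v = 10 then "Y" else if v = 20 then "K" else if v = 30 then "L"
  else if v = 40 then "M" else if v = 50 then "N" else if v = 60 then "S" else if v = 70 then "Ay"
  else if v = 80 then "F" else if v = 90 then "Sd" else if v = 100 then "Q" else if v = 200 then "R"
  else if v = 300 then "Sh" else if v = 400 then "T2" else if v = 500 then "Th" else if v = 600 then "Kh"
  else if v = 700 then "Dh" else if v = 800 then "Dd" else if v = 900 then "Zh" else "Gh"

-- ABJAD_VALUES = sorted(ABJAD_LETTERS.keys(), reverse=True)
def ABJAD_VALUES : List Int :=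
  [1000, 900, 800, 700, 600, 500, 400, 300, 200, 100, 90, 80, 70, 60, 50, 40, 30, 20, 10,
   9, 8, 7, 6, 5, 4, 3, 2, 1]

-- the inner 'while remaining >= v' loop; fuel only makes it total (it is never exhausted, since v ≥ 1)
def abjadWhile (fuel : Nat) (v remaining : Int) (letters translit : List String) :
    List String × List String × Int :=
  match fuel with
  | 0 => (letters, translit, remaining)
  | fuel + 1 =>
    if v ≤ remaining then
      abjadWhile fuel v (remaining - v) (letters ++ [abjadLetter v]) (translit ++ [abjadTranslit v])
    else (letters, translit, remaining)

-- one iteration of A's 'for v in ABJAD_VALUES' body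
def abjadStep (st : List String × List String × Int) (v : Int) : List String × List String × Int :=
  abjadWhile st.2.2.toNat v st.2.2 st.1 st.2.1

def num_to_abjad_py (n : Int) : String :=
  if n ≤ 0 ∨ n > 1999 then PySem.Int.toStr n
  else
    let st := ABJAD_VALUES.foldl abjadStep (([] : List String), ([] : List String), n)
    if st.1 ≠ [] then
      PySem.Str.join "" st.1 ++ "(" ++ PySem.Str.join "" st.2.1 ++ ")"
    else PySem.Int.toStr n

-- ===== PORT B =====
-- B's per-decimal-place tables (index = digit, index 0 = empty string)
def B_UNITS_L : List String := ["", "\u0627", "\u0628", "\u062C", "\u062F", "\u0647", "\u0648", "\u0632", "\u062D", "\u0637"]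
def B_TENS_L : List String := ["", "\u064A", "\u0643", "\u0644", "\u0645", "\u0646", "\u0633", "\u0639", "\u0641", "\u0635"]
def B_HUNDREDS_L : List String := ["", "\u0642", "\u0631", "\u0634", "\u062A", "\u062B", "\u062E", "\u0630", "\u0636", "\u0638"]
def B_THOUSANDS_L : List String := ["", "\u063A"]
def B_UNITS_T : List String := ["", "A", "B", "J", "D", "H", "W", "Z", "Hh", "T"]
def B_TENS_T : List String := ["", "Y", "K", "L", "M", "N", "S", "Ay", "F", "Sd"]
def B_HUNDREDS_T : List String := ["", "Q", "R", "Sh", "T2", "Th", "Kh", "Dh", "Dd", "Zh"]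
def B_THOUSANDS_T : List String := ["", "Gh"]

def num_to_abjad_py_alt (n : Int) : String :=
  if n ≤ 0 ∨ n > 1999 then PySem.Int.toStr n
  else
    let th := PySem.Int.floordiv n 1000
    let h := PySem.Int.mod (PySem.Int.floordiv n 100) 10
    let t := PySem.Int.mod (PySem.Int.floordiv n 10) 10
    let u := PySem.Int.mod n 10
    -- Python list indexing L[d]: exact here, the guard puts every index in range so getD never takes its default
    let letters := (PySem.List.pyGet? B_THOUSANDS_L th).getD "" ++ (PySem.List.pyGet? B_HUNDREDS_L h).getD ""
      ++ (PySem.List.pyGet? B_TENS_L t).getD "" ++ (PySem.List.pyGet? B_UNITS_L u).getD ""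
    let translit := (PySem.List.pyGet? B_THOUSANDS_T th).getD "" ++ (PySem.List.pyGet? B_HUNDREDS_T h).getD ""
      ++ (PySem.List.pyGet? B_TENS_T t).getD "" ++ (PySem.List.pyGet? B_UNITS_T u).getD ""
    letters ++ "(" ++ translit ++ ")"

-- ===== PRECONDITION & SPEC =====
def Spec_num_to_abjad_py (n : Int) (out : String) : Prop := out = num_to_abjad_py_alt n
instance (n : Int) (out : String) : Decidable (Spec_num_to_abjad_py n out) := by unfold Spec_num_to_abjad_py; infer_instance

-- ===== CLAIM (what is proved, stated in full; the proofs are below) =====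
def Claim_equal_num_to_abjad_py : Prop := ∀ (n : Int), Dom_num_to_abjad_py n → Spec_num_to_abjad_py n (num_to_abjad_py n)

-- ===== LEMMAS AND PROOFS =====
-- the abjad values each in-range n decomposes into (characterises A's fold)
def digitVals (n : Int) : List Int :=
  (if n / 1000 ≠ 0 then [n / 1000 * 1000] else []) ++
  (if n % 1000 / 100 ≠ 0 then [n % 1000 / 100 * 100] else []) ++
  (if n % 1000 % 100 / 10 ≠ 0 then [n % 1000 % 100 / 10 * 10] else []) ++
  (if n % 1000 % 100 % 10 ≠ 0 then [n % 1000 % 100 % 10 * 1] else [])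

lemma abjadWhile_noop (fuel : Nat) (v r : Int) (ls ts : List String) (h : r < v) :
    abjadWhile fuel v r ls ts = (ls, ts, r) := by
  cases fuel with
  | zero => simp [abjadWhile]
  | succ f => simp only [abjadWhile]; rw [if_neg (by omega)]

lemma step_skip (ls ts : List String) (r v : Int) (_hv : 1 ≤ v) (h : r < v) :
    abjadStep (ls, ts, r) v = (ls, ts, r) := by
  unfold abjadStep
  exact abjadWhile_noop _ _ _ _ _ h

lemma step_take (ls ts : List String) (r v : Int) (_hv : 1 ≤ v) (h1 : v ≤ r) (h2 : r < 2 * v) :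
    abjadStep (ls, ts, r) v = (ls ++ [abjadLetter v], ts ++ [abjadTranslit v], r - v) := by
  unfold abjadStep
  show abjadWhile r.toNat v r ls ts = _
  have hf : r.toNat = (r.toNat - 1) + 1 := by omega
  rw [hf]
  simp only [abjadWhile]
  rw [if_pos h1, abjadWhile_noop _ _ _ _ _ (by omega)]

lemma band1000 (ls ts : List String) (r : Int) (h0 : 0 ≤ r) (h1 : r ≤ 1999) :
    List.foldl abjadStep (ls, ts, r) [1000]
      = (ls ++ (if r / 1000 ≠ 0 then [abjadLetter (r / 1000 * 1000)] else []),
         ts ++ (if r / 1000 ≠ 0 then [abjadTranslit (r / 1000 * 1000)] else []), r % 1000) := by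
  simp only [List.foldl_cons, List.foldl_nil]
  by_cases h : r < 1000
  · rw [step_skip ls ts r 1000 (by norm_num) (by omega)]
    have hd : r / 1000 = 0 := by omega
    simp [hd]
    omega
  · rw [step_take ls ts r 1000 (by norm_num) (by omega) (by omega)]
    have hd : r / 1000 = 1 := by omega
    simp [hd]
    omega
lemma band100 (ls ts : List String) (r : Int) (h0 : 0 ≤ r) (h1 : r < 1000) :
    List.foldl abjadStep (ls, ts, r) [900, 800, 700, 600, 500, 400, 300, 200, 100]
      = (ls ++ (if r / 100 ≠ 0 then [abjadLetter (r / 100 * 100)] else []),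
         ts ++ (if r / 100 ≠ 0 then [abjadTranslit (r / 100 * 100)] else []), r % 100) := by
  generalize hb : r / 100 = b
  have hb0 : 0 ≤ b := by omega
  have hb9 : b ≤ 9 := by omega
  have hbr : 100 * b ≤ r ∧ r < 100 * b + 100 := by omega
  interval_cases b
  · simp only [List.foldl_cons, List.foldl_nil]
    rw [step_skip ls ts r 900 (by norm_num) (by omega),
        step_skip ls ts r 800 (by norm_num) (by omega),
        step_skip ls ts r 700 (by norm_num) (by omega),
        step_skip ls ts r 600 (by norm_num) (by omega),
        step_skip ls ts r 500 (by norm_num) (by omega),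
        step_skip ls ts r 400 (by norm_num) (by omega),
        step_skip ls ts r 300 (by norm_num) (by omega),
        step_skip ls ts r 200 (by norm_num) (by omega),
        step_skip ls ts r 100 (by norm_num) (by omega)]
    norm_num
    try omega
  · simp only [List.foldl_cons, List.foldl_nil]
    rw [step_skip ls ts r 900 (by norm_num) (by omega),
        step_skip ls ts r 800 (by norm_num) (by omega),
        step_skip ls ts r 700 (by norm_num) (by omega),
        step_skip ls ts r 600 (by norm_num) (by omega),
        step_skip ls ts r 500 (by norm_num) (by omega),
        step_skip ls ts r 400 (by norm_num) (by omega),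
        step_skip ls ts r 300 (by norm_num) (by omega),
        step_skip ls ts r 200 (by norm_num) (by omega),
        step_take ls ts r 100 (by norm_num) (by omega) (by omega)]
    norm_num
    try omega
  · simp only [List.foldl_cons, List.foldl_nil]
    rw [step_skip ls ts r 900 (by norm_num) (by omega),
        step_skip ls ts r 800 (by norm_num) (by omega),
        step_skip ls ts r 700 (by norm_num) (by omega),
        step_skip ls ts r 600 (by norm_num) (by omega),
        step_skip ls ts r 500 (by norm_num) (by omega),
        step_skip ls ts r 400 (by norm_num) (by omega),
        step_skip ls ts r 300 (by norm_num) (by omega),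
        step_take ls ts r 200 (by norm_num) (by omega) (by omega),
        step_skip (ls ++ [abjadLetter 200]) (ts ++ [abjadTranslit 200]) (r - 200) 100 (by norm_num) (by omega)]
    norm_num
    try omega
  · simp only [List.foldl_cons, List.foldl_nil]
    rw [step_skip ls ts r 900 (by norm_num) (by omega),
        step_skip ls ts r 800 (by norm_num) (by omega),
        step_skip ls ts r 700 (by norm_num) (by omega),
        step_skip ls ts r 600 (by norm_num) (by omega),
        step_skip ls ts r 500 (by norm_num) (by omega),
        step_skip ls ts r 400 (by norm_num) (by omega),
        step_take ls ts r 300 (by norm_num) (by omega) (by omega),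
        step_skip (ls ++ [abjadLetter 300]) (ts ++ [abjadTranslit 300]) (r - 300) 200 (by norm_num) (by omega),
        step_skip (ls ++ [abjadLetter 300]) (ts ++ [abjadTranslit 300]) (r - 300) 100 (by norm_num) (by omega)]
    norm_num
    try omega
  · simp only [List.foldl_cons, List.foldl_nil]
    rw [step_skip ls ts r 900 (by norm_num) (by omega),
        step_skip ls ts r 800 (by norm_num) (by omega),
        step_skip ls ts r 700 (by norm_num) (by omega),
        step_skip ls ts r 600 (by norm_num) (by omega),
        step_skip ls ts r 500 (by norm_num) (by omega),
        step_take ls ts r 400 (by norm_num) (by omega) (by omega),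
        step_skip (ls ++ [abjadLetter 400]) (ts ++ [abjadTranslit 400]) (r - 400) 300 (by norm_num) (by omega),
        step_skip (ls ++ [abjadLetter 400]) (ts ++ [abjadTranslit 400]) (r - 400) 200 (by norm_num) (by omega),
        step_skip (ls ++ [abjadLetter 400]) (ts ++ [abjadTranslit 400]) (r - 400) 100 (by norm_num) (by omega)]
    norm_num
    try omega
  · simp only [List.foldl_cons, List.foldl_nil]
    rw [step_skip ls ts r 900 (by norm_num) (by omega),
        step_skip ls ts r 800 (by norm_num) (by omega),
        step_skip ls ts r 700 (by norm_num) (by omega),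
        step_skip ls ts r 600 (by norm_num) (by omega),
        step_take ls ts r 500 (by norm_num) (by omega) (by omega),
        step_skip (ls ++ [abjadLetter 500]) (ts ++ [abjadTranslit 500]) (r - 500) 400 (by norm_num) (by omega),
        step_skip (ls ++ [abjadLetter 500]) (ts ++ [abjadTranslit 500]) (r - 500) 300 (by norm_num) (by omega),
        step_skip (ls ++ [abjadLetter 500]) (ts ++ [abjadTranslit 500]) (r - 500) 200 (by norm_num) (by omega),
        step_skip (ls ++ [abjadLetter 500]) (ts ++ [abjadTranslit 500]) (r - 500) 100 (by norm_num) (by omega)]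
    norm_num
    try omega
  · simp only [List.foldl_cons, List.foldl_nil]
    rw [step_skip ls ts r 900 (by norm_num) (by omega),
        step_skip ls ts r 800 (by norm_num) (by omega),
        step_skip ls ts r 700 (by norm_num) (by omega),
        step_take ls ts r 600 (by norm_num) (by omega) (by omega),
        step_skip (ls ++ [abjadLetter 600]) (ts ++ [abjadTranslit 600]) (r - 600) 500 (by norm_num) (by omega),
        step_skip (ls ++ [abjadLetter 600]) (ts ++ [abjadTranslit 600]) (r - 600) 400 (by norm_num) (by omega),
        step_skip (ls ++ [abjadLetter 600]) (ts ++ [abjadTranslit 600]) (r - 600) 300 (by norm_num) (by omega),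
        step_skip (ls ++ [abjadLetter 600]) (ts ++ [abjadTranslit 600]) (r - 600) 200 (by norm_num) (by omega),
        step_skip (ls ++ [abjadLetter 600]) (ts ++ [abjadTranslit 600]) (r - 600) 100 (by norm_num) (by omega)]
    norm_num
    try omega
  · simp only [List.foldl_cons, List.foldl_nil]
    rw [step_skip ls ts r 900 (by norm_num) (by omega),
        step_skip ls ts r 800 (by norm_num) (by omega),
        step_take ls ts r 700 (by norm_num) (by omega) (by omega),
        step_skip (ls ++ [abjadLetter 700]) (ts ++ [abjadTranslit 700]) (r - 700) 600 (by norm_num) (by omega),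
        step_skip (ls ++ [abjadLetter 700]) (ts ++ [abjadTranslit 700]) (r - 700) 500 (by norm_num) (by omega),
        step_skip (ls ++ [abjadLetter 700]) (ts ++ [abjadTranslit 700]) (r - 700) 400 (by norm_num) (by omega),
        step_skip (ls ++ [abjadLetter 700]) (ts ++ [abjadTranslit 700]) (r - 700) 300 (by norm_num) (by omega),
        step_skip (ls ++ [abjadLetter 700]) (ts ++ [abjadTranslit 700]) (r - 700) 200 (by norm_num) (by omega),
        step_skip (ls ++ [abjadLetter 700]) (ts ++ [abjadTranslit 700]) (r - 700) 100 (by norm_num) (by omega)]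
    norm_num
    try omega
  · simp only [List.foldl_cons, List.foldl_nil]
    rw [step_skip ls ts r 900 (by norm_num) (by omega),
        step_take ls ts r 800 (by norm_num) (by omega) (by omega),
        step_skip (ls ++ [abjadLetter 800]) (ts ++ [abjadTranslit 800]) (r - 800) 700 (by norm_num) (by omega),
        step_skip (ls ++ [abjadLetter 800]) (ts ++ [abjadTranslit 800]) (r - 800) 600 (by norm_num) (by omega),
        step_skip (ls ++ [abjadLetter 800]) (ts ++ [abjadTranslit 800]) (r - 800) 500 (by norm_num) (by omega),
        step_skip (ls ++ [abjadLetter 800]) (ts ++ [abjadTranslit 800]) (r - 800) 400 (by norm_num) (by omega),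
        step_skip (ls ++ [abjadLetter 800]) (ts ++ [abjadTranslit 800]) (r - 800) 300 (by norm_num) (by omega),
        step_skip (ls ++ [abjadLetter 800]) (ts ++ [abjadTranslit 800]) (r - 800) 200 (by norm_num) (by omega),
        step_skip (ls ++ [abjadLetter 800]) (ts ++ [abjadTranslit 800]) (r - 800) 100 (by norm_num) (by omega)]
    norm_num
    try omega
  · simp only [List.foldl_cons, List.foldl_nil]
    rw [step_take ls ts r 900 (by norm_num) (by omega) (by omega),
        step_skip (ls ++ [abjadLetter 900]) (ts ++ [abjadTranslit 900]) (r - 900) 800 (by norm_num) (by omega),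
        step_skip (ls ++ [abjadLetter 900]) (ts ++ [abjadTranslit 900]) (r - 900) 700 (by norm_num) (by omega),
        step_skip (ls ++ [abjadLetter 900]) (ts ++ [abjadTranslit 900]) (r - 900) 600 (by norm_num) (by omega),
        step_skip (ls ++ [abjadLetter 900]) (ts ++ [abjadTranslit 900]) (r - 900) 500 (by norm_num) (by omega),
        step_skip (ls ++ [abjadLetter 900]) (ts ++ [abjadTranslit 900]) (r - 900) 400 (by norm_num) (by omega),
        step_skip (ls ++ [abjadLetter 900]) (ts ++ [abjadTranslit 900]) (r - 900) 300 (by norm_num) (by omega),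
        step_skip (ls ++ [abjadLetter 900]) (ts ++ [abjadTranslit 900]) (r - 900) 200 (by norm_num) (by omega),
        step_skip (ls ++ [abjadLetter 900]) (ts ++ [abjadTranslit 900]) (r - 900) 100 (by norm_num) (by omega)]
    norm_num
    try omega

lemma band10 (ls ts : List String) (r : Int) (h0 : 0 ≤ r) (h1 : r < 100) :
    List.foldl abjadStep (ls, ts, r) [90, 80, 70, 60, 50, 40, 30, 20, 10]
      = (ls ++ (if r / 10 ≠ 0 then [abjadLetter (r / 10 * 10)] else []),
         ts ++ (if r / 10 ≠ 0 then [abjadTranslit (r / 10 * 10)] else []), r % 10) := by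
  generalize hb : r / 10 = b
  have hb0 : 0 ≤ b := by omega
  have hb9 : b ≤ 9 := by omega
  have hbr : 10 * b ≤ r ∧ r < 10 * b + 10 := by omega
  interval_cases b
  · simp only [List.foldl_cons, List.foldl_nil]
    rw [step_skip ls ts r 90 (by norm_num) (by omega),
        step_skip ls ts r 80 (by norm_num) (by omega),
        step_skip ls ts r 70 (by norm_num) (by omega),
        step_skip ls ts r 60 (by norm_num) (by omega),
        step_skip ls ts r 50 (by norm_num) (by omega),
        step_skip ls ts r 40 (by norm_num) (by omega),
        step_skip ls ts r 30 (by norm_num) (by omega),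
        step_skip ls ts r 20 (by norm_num) (by omega),
        step_skip ls ts r 10 (by norm_num) (by omega)]
    norm_num
    try omega
  · simp only [List.foldl_cons, List.foldl_nil]
    rw [step_skip ls ts r 90 (by norm_num) (by omega),
        step_skip ls ts r 80 (by norm_num) (by omega),
        step_skip ls ts r 70 (by norm_num) (by omega),
        step_skip ls ts r 60 (by norm_num) (by omega),
        step_skip ls ts r 50 (by norm_num) (by omega),
        step_skip ls ts r 40 (by norm_num) (by omega),
        step_skip ls ts r 30 (by norm_num) (by omega),
        step_skip ls ts r 20 (by norm_num) (by omega),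
        step_take ls ts r 10 (by norm_num) (by omega) (by omega)]
    norm_num
    try omega
  · simp only [List.foldl_cons, List.foldl_nil]
    rw [step_skip ls ts r 90 (by norm_num) (by omega),
        step_skip ls ts r 80 (by norm_num) (by omega),
        step_skip ls ts r 70 (by norm_num) (by omega),
        step_skip ls ts r 60 (by norm_num) (by omega),
        step_skip ls ts r 50 (by norm_num) (by omega),
        step_skip ls ts r 40 (by norm_num) (by omega),
        step_skip ls ts r 30 (by norm_num) (by omega),
        step_take ls ts r 20 (by norm_num) (by omega) (by omega),
        step_skip (ls ++ [abjadLetter 20]) (ts ++ [abjadTranslit 20]) (r - 20) 10 (by norm_num) (by omega)]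
    norm_num
    try omega
  · simp only [List.foldl_cons, List.foldl_nil]
    rw [step_skip ls ts r 90 (by norm_num) (by omega),
        step_skip ls ts r 80 (by norm_num) (by omega),
        step_skip ls ts r 70 (by norm_num) (by omega),
        step_skip ls ts r 60 (by norm_num) (by omega),
        step_skip ls ts r 50 (by norm_num) (by omega),
        step_skip ls ts r 40 (by norm_num) (by omega),
        step_take ls ts r 30 (by norm_num) (by omega) (by omega),
        step_skip (ls ++ [abjadLetter 30]) (ts ++ [abjadTranslit 30]) (r - 30) 20 (by norm_num) (by omega),
        step_skip (ls ++ [abjadLetter 30]) (ts ++ [abjadTranslit 30]) (r - 30) 10 (by norm_num) (by omega)]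
    norm_num
    try omega
  · simp only [List.foldl_cons, List.foldl_nil]
    rw [step_skip ls ts r 90 (by norm_num) (by omega),
        step_skip ls ts r 80 (by norm_num) (by omega),
        step_skip ls ts r 70 (by norm_num) (by omega),
        step_skip ls ts r 60 (by norm_num) (by omega),
        step_skip ls ts r 50 (by norm_num) (by omega),
        step_take ls ts r 40 (by norm_num) (by omega) (by omega),
        step_skip (ls ++ [abjadLetter 40]) (ts ++ [abjadTranslit 40]) (r - 40) 30 (by norm_num) (by omega),
        step_skip (ls ++ [abjadLetter 40]) (ts ++ [abjadTranslit 40]) (r - 40) 20 (by norm_num) (by omega),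
        step_skip (ls ++ [abjadLetter 40]) (ts ++ [abjadTranslit 40]) (r - 40) 10 (by norm_num) (by omega)]
    norm_num
    try omega
  · simp only [List.foldl_cons, List.foldl_nil]
    rw [step_skip ls ts r 90 (by norm_num) (by omega),
        step_skip ls ts r 80 (by norm_num) (by omega),
        step_skip ls ts r 70 (by norm_num) (by omega),
        step_skip ls ts r 60 (by norm_num) (by omega),
        step_take ls ts r 50 (by norm_num) (by omega) (by omega),
        step_skip (ls ++ [abjadLetter 50]) (ts ++ [abjadTranslit 50]) (r - 50) 40 (by norm_num) (by omega),
        step_skip (ls ++ [abjadLetter 50]) (ts ++ [abjadTranslit 50]) (r - 50) 30 (by norm_num) (by omega),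
        step_skip (ls ++ [abjadLetter 50]) (ts ++ [abjadTranslit 50]) (r - 50) 20 (by norm_num) (by omega),
        step_skip (ls ++ [abjadLetter 50]) (ts ++ [abjadTranslit 50]) (r - 50) 10 (by norm_num) (by omega)]
    norm_num
    try omega
  · simp only [List.foldl_cons, List.foldl_nil]
    rw [step_skip ls ts r 90 (by norm_num) (by omega),
        step_skip ls ts r 80 (by norm_num) (by omega),
        step_skip ls ts r 70 (by norm_num) (by omega),
        step_take ls ts r 60 (by norm_num) (by omega) (by omega),
        step_skip (ls ++ [abjadLetter 60]) (ts ++ [abjadTranslit 60]) (r - 60) 50 (by norm_num) (by omega),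
        step_skip (ls ++ [abjadLetter 60]) (ts ++ [abjadTranslit 60]) (r - 60) 40 (by norm_num) (by omega),
        step_skip (ls ++ [abjadLetter 60]) (ts ++ [abjadTranslit 60]) (r - 60) 30 (by norm_num) (by omega),
        step_skip (ls ++ [abjadLetter 60]) (ts ++ [abjadTranslit 60]) (r - 60) 20 (by norm_num) (by omega),
        step_skip (ls ++ [abjadLetter 60]) (ts ++ [abjadTranslit 60]) (r - 60) 10 (by norm_num) (by omega)]
    norm_num
    try omega
  · simp only [List.foldl_cons, List.foldl_nil]
    rw [step_skip ls ts r 90 (by norm_num) (by omega),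
        step_skip ls ts r 80 (by norm_num) (by omega),
        step_take ls ts r 70 (by norm_num) (by omega) (by omega),
        step_skip (ls ++ [abjadLetter 70]) (ts ++ [abjadTranslit 70]) (r - 70) 60 (by norm_num) (by omega),
        step_skip (ls ++ [abjadLetter 70]) (ts ++ [abjadTranslit 70]) (r - 70) 50 (by norm_num) (by omega),
        step_skip (ls ++ [abjadLetter 70]) (ts ++ [abjadTranslit 70]) (r - 70) 40 (by norm_num) (by omega),
        step_skip (ls ++ [abjadLetter 70]) (ts ++ [abjadTranslit 70]) (r - 70) 30 (by norm_num) (by omega),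
        step_skip (ls ++ [abjadLetter 70]) (ts ++ [abjadTranslit 70]) (r - 70) 20 (by norm_num) (by omega),
        step_skip (ls ++ [abjadLetter 70]) (ts ++ [abjadTranslit 70]) (r - 70) 10 (by norm_num) (by omega)]
    norm_num
    try omega
  · simp only [List.foldl_cons, List.foldl_nil]
    rw [step_skip ls ts r 90 (by norm_num) (by omega),
        step_take ls ts r 80 (by norm_num) (by omega) (by omega),
        step_skip (ls ++ [abjadLetter 80]) (ts ++ [abjadTranslit 80]) (r - 80) 70 (by norm_num) (by omega),
        step_skip (ls ++ [abjadLetter 80]) (ts ++ [abjadTranslit 80]) (r - 80) 60 (by norm_num) (by omega),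
        step_skip (ls ++ [abjadLetter 80]) (ts ++ [abjadTranslit 80]) (r - 80) 50 (by norm_num) (by omega),
        step_skip (ls ++ [abjadLetter 80]) (ts ++ [abjadTranslit 80]) (r - 80) 40 (by norm_num) (by omega),
        step_skip (ls ++ [abjadLetter 80]) (ts ++ [abjadTranslit 80]) (r - 80) 30 (by norm_num) (by omega),
        step_skip (ls ++ [abjadLetter 80]) (ts ++ [abjadTranslit 80]) (r - 80) 20 (by norm_num) (by omega),
        step_skip (ls ++ [abjadLetter 80]) (ts ++ [abjadTranslit 80]) (r - 80) 10 (by norm_num) (by omega)]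
    norm_num
    try omega
  · simp only [List.foldl_cons, List.foldl_nil]
    rw [step_take ls ts r 90 (by norm_num) (by omega) (by omega),
        step_skip (ls ++ [abjadLetter 90]) (ts ++ [abjadTranslit 90]) (r - 90) 80 (by norm_num) (by omega),
        step_skip (ls ++ [abjadLetter 90]) (ts ++ [abjadTranslit 90]) (r - 90) 70 (by norm_num) (by omega),
        step_skip (ls ++ [abjadLetter 90]) (ts ++ [abjadTranslit 90]) (r - 90) 60 (by norm_num) (by omega),
        step_skip (ls ++ [abjadLetter 90]) (ts ++ [abjadTranslit 90]) (r - 90) 50 (by norm_num) (by omega),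
        step_skip (ls ++ [abjadLetter 90]) (ts ++ [abjadTranslit 90]) (r - 90) 40 (by norm_num) (by omega),
        step_skip (ls ++ [abjadLetter 90]) (ts ++ [abjadTranslit 90]) (r - 90) 30 (by norm_num) (by omega),
        step_skip (ls ++ [abjadLetter 90]) (ts ++ [abjadTranslit 90]) (r - 90) 20 (by norm_num) (by omega),
        step_skip (ls ++ [abjadLetter 90]) (ts ++ [abjadTranslit 90]) (r - 90) 10 (by norm_num) (by omega)]
    norm_num
    try omega

lemma band1 (ls ts : List String) (r : Int) (h0 : 0 ≤ r) (h1 : r < 10) :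
    List.foldl abjadStep (ls, ts, r) [9, 8, 7, 6, 5, 4, 3, 2, 1]
      = (ls ++ (if r ≠ 0 then [abjadLetter (r * 1)] else []),
         ts ++ (if r ≠ 0 then [abjadTranslit (r * 1)] else []), 0) := by
  interval_cases r
  · simp only [List.foldl_cons, List.foldl_nil]
    rw [step_skip ls ts (0 : Int) 9 (by norm_num) (by omega),
        step_skip ls ts (0 : Int) 8 (by norm_num) (by omega),
        step_skip ls ts (0 : Int) 7 (by norm_num) (by omega),
        step_skip ls ts (0 : Int) 6 (by norm_num) (by omega),
        step_skip ls ts (0 : Int) 5 (by norm_num) (by omega),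
        step_skip ls ts (0 : Int) 4 (by norm_num) (by omega),
        step_skip ls ts (0 : Int) 3 (by norm_num) (by omega),
        step_skip ls ts (0 : Int) 2 (by norm_num) (by omega),
        step_skip ls ts (0 : Int) 1 (by norm_num) (by omega)]
    norm_num
    try omega
  · simp only [List.foldl_cons, List.foldl_nil]
    rw [step_skip ls ts (1 : Int) 9 (by norm_num) (by omega),
        step_skip ls ts (1 : Int) 8 (by norm_num) (by omega),
        step_skip ls ts (1 : Int) 7 (by norm_num) (by omega),
        step_skip ls ts (1 : Int) 6 (by norm_num) (by omega),
        step_skip ls ts (1 : Int) 5 (by norm_num) (by omega),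
        step_skip ls ts (1 : Int) 4 (by norm_num) (by omega),
        step_skip ls ts (1 : Int) 3 (by norm_num) (by omega),
        step_skip ls ts (1 : Int) 2 (by norm_num) (by omega),
        step_take ls ts (1 : Int) 1 (by norm_num) (by omega) (by omega)]
    norm_num
    try omega
  · simp only [List.foldl_cons, List.foldl_nil]
    rw [step_skip ls ts (2 : Int) 9 (by norm_num) (by omega),
        step_skip ls ts (2 : Int) 8 (by norm_num) (by omega),
        step_skip ls ts (2 : Int) 7 (by norm_num) (by omega),
        step_skip ls ts (2 : Int) 6 (by norm_num) (by omega),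
        step_skip ls ts (2 : Int) 5 (by norm_num) (by omega),
        step_skip ls ts (2 : Int) 4 (by norm_num) (by omega),
        step_skip ls ts (2 : Int) 3 (by norm_num) (by omega),
        step_take ls ts (2 : Int) 2 (by norm_num) (by omega) (by omega),
        step_skip (ls ++ [abjadLetter 2]) (ts ++ [abjadTranslit 2]) ((2 : Int) - 2) 1 (by norm_num) (by omega)]
    norm_num
    try omega
  · simp only [List.foldl_cons, List.foldl_nil]
    rw [step_skip ls ts (3 : Int) 9 (by norm_num) (by omega),
        step_skip ls ts (3 : Int) 8 (by norm_num) (by omega),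
        step_skip ls ts (3 : Int) 7 (by norm_num) (by omega),
        step_skip ls ts (3 : Int) 6 (by norm_num) (by omega),
        step_skip ls ts (3 : Int) 5 (by norm_num) (by omega),
        step_skip ls ts (3 : Int) 4 (by norm_num) (by omega),
        step_take ls ts (3 : Int) 3 (by norm_num) (by omega) (by omega),
        step_skip (ls ++ [abjadLetter 3]) (ts ++ [abjadTranslit 3]) ((3 : Int) - 3) 2 (by norm_num) (by omega),
        step_skip (ls ++ [abjadLetter 3]) (ts ++ [abjadTranslit 3]) ((3 : Int) - 3) 1 (by norm_num) (by omega)]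
    norm_num
    try omega
  · simp only [List.foldl_cons, List.foldl_nil]
    rw [step_skip ls ts (4 : Int) 9 (by norm_num) (by omega),
        step_skip ls ts (4 : Int) 8 (by norm_num) (by omega),
        step_skip ls ts (4 : Int) 7 (by norm_num) (by omega),
        step_skip ls ts (4 : Int) 6 (by norm_num) (by omega),
        step_skip ls ts (4 : Int) 5 (by norm_num) (by omega),
        step_take ls ts (4 : Int) 4 (by norm_num) (by omega) (by omega),
        step_skip (ls ++ [abjadLetter 4]) (ts ++ [abjadTranslit 4]) ((4 : Int) - 4) 3 (by norm_num) (by omega),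
        step_skip (ls ++ [abjadLetter 4]) (ts ++ [abjadTranslit 4]) ((4 : Int) - 4) 2 (by norm_num) (by omega),
        step_skip (ls ++ [abjadLetter 4]) (ts ++ [abjadTranslit 4]) ((4 : Int) - 4) 1 (by norm_num) (by omega)]
    norm_num
    try omega
  · simp only [List.foldl_cons, List.foldl_nil]
    rw [step_skip ls ts (5 : Int) 9 (by norm_num) (by omega),
        step_skip ls ts (5 : Int) 8 (by norm_num) (by omega),
        step_skip ls ts (5 : Int) 7 (by norm_num) (by omega),
        step_skip ls ts (5 : Int) 6 (by norm_num) (by omega),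
        step_take ls ts (5 : Int) 5 (by norm_num) (by omega) (by omega),
        step_skip (ls ++ [abjadLetter 5]) (ts ++ [abjadTranslit 5]) ((5 : Int) - 5) 4 (by norm_num) (by omega),
        step_skip (ls ++ [abjadLetter 5]) (ts ++ [abjadTranslit 5]) ((5 : Int) - 5) 3 (by norm_num) (by omega),
        step_skip (ls ++ [abjadLetter 5]) (ts ++ [abjadTranslit 5]) ((5 : Int) - 5) 2 (by norm_num) (by omega),
        step_skip (ls ++ [abjadLetter 5]) (ts ++ [abjadTranslit 5]) ((5 : Int) - 5) 1 (by norm_num) (by omega)]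
    norm_num
    try omega
  · simp only [List.foldl_cons, List.foldl_nil]
    rw [step_skip ls ts (6 : Int) 9 (by norm_num) (by omega),
        step_skip ls ts (6 : Int) 8 (by norm_num) (by omega),
        step_skip ls ts (6 : Int) 7 (by norm_num) (by omega),
        step_take ls ts (6 : Int) 6 (by norm_num) (by omega) (by omega),
        step_skip (ls ++ [abjadLetter 6]) (ts ++ [abjadTranslit 6]) ((6 : Int) - 6) 5 (by norm_num) (by omega),
        step_skip (ls ++ [abjadLetter 6]) (ts ++ [abjadTranslit 6]) ((6 : Int) - 6) 4 (by norm_num) (by omega),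
        step_skip (ls ++ [abjadLetter 6]) (ts ++ [abjadTranslit 6]) ((6 : Int) - 6) 3 (by norm_num) (by omega),
        step_skip (ls ++ [abjadLetter 6]) (ts ++ [abjadTranslit 6]) ((6 : Int) - 6) 2 (by norm_num) (by omega),
        step_skip (ls ++ [abjadLetter 6]) (ts ++ [abjadTranslit 6]) ((6 : Int) - 6) 1 (by norm_num) (by omega)]
    norm_num
    try omega
  · simp only [List.foldl_cons, List.foldl_nil]
    rw [step_skip ls ts (7 : Int) 9 (by norm_num) (by omega),
        step_skip ls ts (7 : Int) 8 (by norm_num) (by omega),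
        step_take ls ts (7 : Int) 7 (by norm_num) (by omega) (by omega),
        step_skip (ls ++ [abjadLetter 7]) (ts ++ [abjadTranslit 7]) ((7 : Int) - 7) 6 (by norm_num) (by omega),
        step_skip (ls ++ [abjadLetter 7]) (ts ++ [abjadTranslit 7]) ((7 : Int) - 7) 5 (by norm_num) (by omega),
        step_skip (ls ++ [abjadLetter 7]) (ts ++ [abjadTranslit 7]) ((7 : Int) - 7) 4 (by norm_num) (by omega),
        step_skip (ls ++ [abjadLetter 7]) (ts ++ [abjadTranslit 7]) ((7 : Int) - 7) 3 (by norm_num) (by omega),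
        step_skip (ls ++ [abjadLetter 7]) (ts ++ [abjadTranslit 7]) ((7 : Int) - 7) 2 (by norm_num) (by omega),
        step_skip (ls ++ [abjadLetter 7]) (ts ++ [abjadTranslit 7]) ((7 : Int) - 7) 1 (by norm_num) (by omega)]
    norm_num
    try omega
  · simp only [List.foldl_cons, List.foldl_nil]
    rw [step_skip ls ts (8 : Int) 9 (by norm_num) (by omega),
        step_take ls ts (8 : Int) 8 (by norm_num) (by omega) (by omega),
        step_skip (ls ++ [abjadLetter 8]) (ts ++ [abjadTranslit 8]) ((8 : Int) - 8) 7 (by norm_num) (by omega),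
        step_skip (ls ++ [abjadLetter 8]) (ts ++ [abjadTranslit 8]) ((8 : Int) - 8) 6 (by norm_num) (by omega),
        step_skip (ls ++ [abjadLetter 8]) (ts ++ [abjadTranslit 8]) ((8 : Int) - 8) 5 (by norm_num) (by omega),
        step_skip (ls ++ [abjadLetter 8]) (ts ++ [abjadTranslit 8]) ((8 : Int) - 8) 4 (by norm_num) (by omega),
        step_skip (ls ++ [abjadLetter 8]) (ts ++ [abjadTranslit 8]) ((8 : Int) - 8) 3 (by norm_num) (by omega),
        step_skip (ls ++ [abjadLetter 8]) (ts ++ [abjadTranslit 8]) ((8 : Int) - 8) 2 (by norm_num) (by omega),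
        step_skip (ls ++ [abjadLetter 8]) (ts ++ [abjadTranslit 8]) ((8 : Int) - 8) 1 (by norm_num) (by omega)]
    norm_num
    try omega
  · simp only [List.foldl_cons, List.foldl_nil]
    rw [step_take ls ts (9 : Int) 9 (by norm_num) (by omega) (by omega),
        step_skip (ls ++ [abjadLetter 9]) (ts ++ [abjadTranslit 9]) ((9 : Int) - 9) 8 (by norm_num) (by omega),
        step_skip (ls ++ [abjadLetter 9]) (ts ++ [abjadTranslit 9]) ((9 : Int) - 9) 7 (by norm_num) (by omega),
        step_skip (ls ++ [abjadLetter 9]) (ts ++ [abjadTranslit 9]) ((9 : Int) - 9) 6 (by norm_num) (by omega),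
        step_skip (ls ++ [abjadLetter 9]) (ts ++ [abjadTranslit 9]) ((9 : Int) - 9) 5 (by norm_num) (by omega),
        step_skip (ls ++ [abjadLetter 9]) (ts ++ [abjadTranslit 9]) ((9 : Int) - 9) 4 (by norm_num) (by omega),
        step_skip (ls ++ [abjadLetter 9]) (ts ++ [abjadTranslit 9]) ((9 : Int) - 9) 3 (by norm_num) (by omega),
        step_skip (ls ++ [abjadLetter 9]) (ts ++ [abjadTranslit 9]) ((9 : Int) - 9) 2 (by norm_num) (by omega),
        step_skip (ls ++ [abjadLetter 9]) (ts ++ [abjadTranslit 9]) ((9 : Int) - 9) 1 (by norm_num) (by omega)]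
    norm_num
    try omega

lemma foldA (n : Int) (h1 : 1 ≤ n) (h2 : n ≤ 1999) :
    ABJAD_VALUES.foldl abjadStep (([] : List String), ([] : List String), n)
      = ((digitVals n).map abjadLetter, (digitVals n).map abjadTranslit, 0) := by
  have hsplit : ABJAD_VALUES
      = [1000] ++ [900, 800, 700, 600, 500, 400, 300, 200, 100]
        ++ [90, 80, 70, 60, 50, 40, 30, 20, 10] ++ [9, 8, 7, 6, 5, 4, 3, 2, 1] := rfl
  rw [hsplit, List.foldl_append, List.foldl_append, List.foldl_append]
  rw [band1000 _ _ n (by omega) (by omega)]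
  rw [band100 _ _ (n % 1000) (by omega) (by omega)]
  rw [band10 _ _ (n % 1000 % 100) (by omega) (by omega)]
  rw [band1 _ _ (n % 1000 % 100 % 10) (by omega) (by omega)]
  simp only [digitVals, List.map_append, apply_ite (List.map abjadLetter),
    apply_ite (List.map abjadTranslit), List.map_cons, List.map_nil,
    List.nil_append, List.append_assoc]

lemma digitVals_ne_nil (n : Int) (h1 : 1 ≤ n) (h2 : n ≤ 1999) : digitVals n ≠ [] := by
  unfold digitVals
  split_ifs <;> simp_all <;> omega

-- '' .join distributes over ++ (Chars level first, then String level)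
lemma chars_join_append (xs ys : List (List Char)) :
    PySem.Chars.join [] (xs ++ ys) = PySem.Chars.join [] xs ++ PySem.Chars.join [] ys := by
  induction xs with
  | nil => simp [PySem.Chars.join_nil]
  | cons p rest ih =>
    cases rest with
    | nil =>
      cases ys with
      | nil => simp [PySem.Chars.join_singleton, PySem.Chars.join_nil]
      | cons q t => simp [PySem.Chars.join_singleton, PySem.Chars.join_cons_cons]
    | cons q t =>
      simp only [List.cons_append] at ih ⊢
      rw [PySem.Chars.join_cons_cons, PySem.Chars.join_cons_cons, ih, List.append_assoc]
      simp

lemma str_join_append (xs ys : List String) :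
    PySem.Str.join "" (xs ++ ys) = PySem.Str.join "" xs ++ PySem.Str.join "" ys := by
  rw [← String.toList_inj]
  simp [PySem.Str.toList_join, chars_join_append]

-- each per-place segment of A's output equals B's table lookup at the corresponding digit
lemma segTh_L (d : Int) (h0 : 0 ≤ d) (h9 : d < 2) :
    PySem.Str.join "" (List.map abjadLetter (if d ≠ 0 then [d * 1000] else []))
      = (PySem.List.pyGet? B_THOUSANDS_L d).getD "" := by
  interval_cases d <;> decide

lemma segH_L (d : Int) (h0 : 0 ≤ d) (h9 : d < 10) :
    PySem.Str.join "" (List.map abjadLetter (if d ≠ 0 then [d * 100] else []))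
      = (PySem.List.pyGet? B_HUNDREDS_L d).getD "" := by
  interval_cases d <;> decide

lemma segT_L (d : Int) (h0 : 0 ≤ d) (h9 : d < 10) :
    PySem.Str.join "" (List.map abjadLetter (if d ≠ 0 then [d * 10] else []))
      = (PySem.List.pyGet? B_TENS_L d).getD "" := by
  interval_cases d <;> decide

lemma segU_L (d : Int) (h0 : 0 ≤ d) (h9 : d < 10) :
    PySem.Str.join "" (List.map abjadLetter (if d ≠ 0 then [d * 1] else []))
      = (PySem.List.pyGet? B_UNITS_L d).getD "" := by
  interval_cases d <;> decide

lemma segTh_T (d : Int) (h0 : 0 ≤ d) (h9 : d < 2) :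
    PySem.Str.join "" (List.map abjadTranslit (if d ≠ 0 then [d * 1000] else []))
      = (PySem.List.pyGet? B_THOUSANDS_T d).getD "" := by
  interval_cases d <;> decide

lemma segH_T (d : Int) (h0 : 0 ≤ d) (h9 : d < 10) :
    PySem.Str.join "" (List.map abjadTranslit (if d ≠ 0 then [d * 100] else []))
      = (PySem.List.pyGet? B_HUNDREDS_T d).getD "" := by
  interval_cases d <;> decide

lemma segT_T (d : Int) (h0 : 0 ≤ d) (h9 : d < 10) :
    PySem.Str.join "" (List.map abjadTranslit (if d ≠ 0 then [d * 10] else []))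
      = (PySem.List.pyGet? B_TENS_T d).getD "" := by
  interval_cases d <;> decide

lemma segU_T (d : Int) (h0 : 0 ≤ d) (h9 : d < 10) :
    PySem.Str.join "" (List.map abjadTranslit (if d ≠ 0 then [d * 1] else []))
      = (PySem.List.pyGet? B_UNITS_T d).getD "" := by
  interval_cases d <;> decide

lemma joinA_L (n : Int) (h1 : 1 ≤ n) (h2 : n ≤ 1999) :
    PySem.Str.join "" ((digitVals n).map abjadLetter)
      = (PySem.List.pyGet? B_THOUSANDS_L (n / 1000)).getD ""
        ++ (PySem.List.pyGet? B_HUNDREDS_L (n % 1000 / 100)).getD ""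
        ++ (PySem.List.pyGet? B_TENS_L (n % 1000 % 100 / 10)).getD ""
        ++ (PySem.List.pyGet? B_UNITS_L (n % 1000 % 100 % 10)).getD "" := by
  simp only [digitVals, List.map_append, str_join_append]
  rw [segTh_L (n / 1000) (by omega) (by omega),
      segH_L (n % 1000 / 100) (by omega) (by omega),
      segT_L (n % 1000 % 100 / 10) (by omega) (by omega),
      segU_L (n % 1000 % 100 % 10) (by omega) (by omega)]

lemma joinA_T (n : Int) (h1 : 1 ≤ n) (h2 : n ≤ 1999) :
    PySem.Str.join "" ((digitVals n).map abjadTranslit)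
      = (PySem.List.pyGet? B_THOUSANDS_T (n / 1000)).getD ""
        ++ (PySem.List.pyGet? B_HUNDREDS_T (n % 1000 / 100)).getD ""
        ++ (PySem.List.pyGet? B_TENS_T (n % 1000 % 100 / 10)).getD ""
        ++ (PySem.List.pyGet? B_UNITS_T (n % 1000 % 100 % 10)).getD "" := by
  simp only [digitVals, List.map_append, str_join_append]
  rw [segTh_T (n / 1000) (by omega) (by omega),
      segH_T (n % 1000 / 100) (by omega) (by omega),
      segT_T (n % 1000 % 100 / 10) (by omega) (by omega),
      segU_T (n % 1000 % 100 % 10) (by omega) (by omega)]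

lemma altB (n : Int) (h1 : 1 ≤ n) (h2 : n ≤ 1999) :
    num_to_abjad_py_alt n
      = ((PySem.List.pyGet? B_THOUSANDS_L (n / 1000)).getD ""
          ++ (PySem.List.pyGet? B_HUNDREDS_L (n % 1000 / 100)).getD ""
          ++ (PySem.List.pyGet? B_TENS_L (n % 1000 % 100 / 10)).getD ""
          ++ (PySem.List.pyGet? B_UNITS_L (n % 1000 % 100 % 10)).getD "")
        ++ "("
        ++ ((PySem.List.pyGet? B_THOUSANDS_T (n / 1000)).getD ""
          ++ (PySem.List.pyGet? B_HUNDREDS_T (n % 1000 / 100)).getD ""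
          ++ (PySem.List.pyGet? B_TENS_T (n % 1000 % 100 / 10)).getD ""
          ++ (PySem.List.pyGet? B_UNITS_T (n % 1000 % 100 % 10)).getD "")
        ++ ")" := by
  unfold num_to_abjad_py_alt
  rw [if_neg (by omega)]
  simp only [PySem.Int.floordiv_eq_ediv_of_pos (show (0:Int) < 1000 by norm_num),
    PySem.Int.floordiv_eq_ediv_of_pos (show (0:Int) < 100 by norm_num),
    PySem.Int.floordiv_eq_ediv_of_pos (show (0:Int) < 10 by norm_num),
    PySem.Int.mod_eq_emod_of_pos (show (0:Int) < 10 by norm_num)]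
  have e1 : n / 100 % 10 = n % 1000 / 100 := by omega
  have e2 : n / 10 % 10 = n % 1000 % 100 / 10 := by omega
  have e3 : n % 10 = n % 1000 % 100 % 10 := by omega
  rw [e1, e2, e3]

-- ===== VERDICT (by name: the statement is the Claim_ definition above) =====
theorem num_to_abjad_py_spec : Claim_equal_num_to_abjad_py := by
  intro n _
  unfold Spec_num_to_abjad_py
  by_cases h : n ≤ 0 ∨ n > 1999
  · simp [num_to_abjad_py, num_to_abjad_py_alt, h]
  · rw [not_or] at h
    have h1 : 1 ≤ n := by omega
    have h2 : n ≤ 1999 := by omega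
    have hne : (digitVals n).map abjadLetter ≠ [] := by
      simp [List.map_eq_nil_iff, digitVals_ne_nil n h1 h2]
    have hA : num_to_abjad_py n
        = PySem.Str.join "" ((digitVals n).map abjadLetter) ++ "("
            ++ PySem.Str.join "" ((digitVals n).map abjadTranslit) ++ ")" := by
      unfold num_to_abjad_py
      rw [if_neg (by omega)]
      simp only [foldA n h1 h2]
      rw [if_pos hne]
    rw [hA, joinA_L n h1 h2, joinA_T n h1 h2, altB n h1 h2]
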